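-- pv_equiv track=rewrite | github.com/DrBr4n/LA2 | treino1/repete.py | repete
-- ===== SOURCE A (Python) =====
-- def repete(palavra,n):
--
--     result = palavra
--     to_Add = palavra
--
--     e = len(palavra) - 1
--     i = 1
--     while e != 0:
--         while i < len(palavra):
--             if(result[e:] + result[i:] == palavra):
--                 to_Add = result[i:]
--             i += 1
--         e -= 1
--         i = 1
--
--     j = 1
--     while j != n:
--         result += to_Add
--         j += 1
--
--     return result
-- ===== SOURCE B (Python) =====
-- def repete(palavra, n):
--     L = len(palavra)
--     for b in range(L - 1, 0, -1):
--         if palavra[L - b:] == palavra[:b]: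
--             return palavra + palavra[b:] * (n - 1)
--     return palavra + palavra * (n - 1)
-- ===== Notes on version B (the rewrite author's own statement) =====
-- stated objective: faster
-- what changed: A scans all (e,i) pairs comparing concatenated slices against the word and keeps the last match, then appends in a loop; B scans candidate border lengths b descending once, returns on the first (=longest) border via a suffix==prefix check and builds the result with string multiplication.
import Mathlib
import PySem

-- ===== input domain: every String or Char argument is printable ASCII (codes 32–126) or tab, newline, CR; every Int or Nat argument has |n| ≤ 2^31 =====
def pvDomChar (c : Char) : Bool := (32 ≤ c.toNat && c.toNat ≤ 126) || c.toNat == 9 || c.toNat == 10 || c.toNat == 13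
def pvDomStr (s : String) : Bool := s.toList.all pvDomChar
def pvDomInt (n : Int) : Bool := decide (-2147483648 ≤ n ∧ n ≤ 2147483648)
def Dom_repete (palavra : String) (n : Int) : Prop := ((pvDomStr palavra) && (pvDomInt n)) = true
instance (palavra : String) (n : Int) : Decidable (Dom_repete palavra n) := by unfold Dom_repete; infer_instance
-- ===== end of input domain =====

-- B replaces A's triple-nested last-match scan over all (e,i) slice pairs by a single
-- descending first-match scan over border lengths with string multiplication (objective: faster).

-- ===== PORT A =====
-- inner 'while i < len(palavra)' loop: i runs over 1 .. len-1; to_Add overwritten on each match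
def repeteInner (cs : List Char) (e : Nat) (toAdd : List Char) : List Char :=
  (List.range' 1 (cs.length - 1)).foldl
    (fun (acc : List Char) (i : Nat) =>
      if PySem.List.slice cs (some (e : Int)) none ++ PySem.List.slice cs (some (i : Int)) none = cs
      then PySem.List.slice cs (some (i : Int)) none
      else acc)
    toAdd

-- outer 'while e != 0' loop, e counting down from len-1 (for palavra = '' Python A never
-- terminates; such inputs are outside Pre_repete)
def repeteScan (cs : List Char) : Nat → List Char → List Char
  | 0, toAdd => toAdd
  | e + 1, toAdd => repeteScan cs e (repeteInner cs (e + 1) toAdd)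

-- final 'while j != n' loop (for n < 1 Python A never terminates — outside Pre_repete;
-- the 'else result' branch is only a totality guard for that excluded region)
def repeteApp (toAdd result : List Char) (j n : Int) : List Char :=
  if j = n then result
  else if j < n then repeteApp toAdd (result ++ toAdd) (j + 1) n
  else result
termination_by (n - j).toNat
decreasing_by omega

def repete (palavra : String) (n : Int) : String :=
  let result := palavra.toList
  let toAdd := repeteScan result (result.length - 1) result
  String.ofList (repeteApp toAdd result 1 n)

-- ===== PORT B =====
-- 'for b in range(L-1, 0, -1): if palavra[L-b:] == palavra[:b]: return palavra + palavra[b:]*(n-1)'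
-- with fallthrough 'return palavra + palavra*(n-1)' (the b = 0 base case)
def altLoop (cs : List Char) (n : Int) : Nat → List Char
  | 0 => cs ++ PySem.List.pyRepeat cs (n - 1)
  | b + 1 =>
    if PySem.List.slice cs (some ((cs.length - (b + 1) : Nat) : Int)) none
       = PySem.List.slice cs none (some ((b + 1 : Nat) : Int))
    then cs ++ PySem.List.pyRepeat (PySem.List.slice cs (some ((b + 1 : Nat) : Int)) none) (n - 1)
    else altLoop cs n b

def repete_alt (palavra : String) (n : Int) : String :=
  let cs := palavra.toList
  String.ofList (altLoop cs n (cs.length - 1))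

-- ===== PRECONDITION & SPEC =====
-- Pre_ excludes palavra = '' and n < 1: on those inputs Python A loops forever (no return).
def Pre_repete (palavra : String) (n : Int) : Prop :=
  1 ≤ PySem.Str.len palavra ∧ 1 ≤ n
instance (palavra : String) (n : Int) : Decidable (Pre_repete palavra n) := by
  unfold Pre_repete; infer_instance

def pvWitness_repete : String × Int := ("abcab", 3)

def Spec_repete (palavra : String) (n : Int) (out : String) : Prop := out = repete_alt palavra n
instance (palavra : String) (n : Int) (out : String) : Decidable (Spec_repete palavra n out) := by
  unfold Spec_repete; infer_instance

-- ===== CLAIM (what is proved, stated in full; the proofs are below) =====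
def Claim_equal_repete : Prop := ∀ (palavra : String) (n : Int), Dom_repete palavra n → Pre_repete palavra n → Spec_repete palavra n (repete palavra n)

-- ===== LEMMAS AND PROOFS =====

-- proof-side search for the longest border length ≤ b (0 = none)
def findB (cs : List Char) : Nat → Nat
  | 0 => 0
  | b + 1 => if cs.drop (cs.length - (b + 1)) = cs.take (b + 1) then b + 1 else findB cs b

lemma findB_le (cs : List Char) (b : Nat) : findB cs b ≤ b := by
  induction b with
  | zero => simp [findB]
  | succ b ih =>
    simp only [findB]
    split_ifs with h
    · exact le_refl _
    · exact ih.trans (by omega)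

lemma findB_border (cs : List Char) (b : Nat) (h : 1 ≤ findB cs b) :
    cs.drop (cs.length - findB cs b) = cs.take (findB cs b) := by
  induction b with
  | zero => simp [findB] at h
  | succ b ih =>
    by_cases hc : cs.drop (cs.length - (b + 1)) = cs.take (b + 1)
    · simp only [findB, if_pos hc]
      exact hc
    · simp only [findB, if_neg hc] at h ⊢
      exact ih h

lemma findB_max (cs : List Char) (b b' : Nat) (h1 : 1 ≤ b') (h2 : b' ≤ b)
    (h3 : cs.drop (cs.length - b') = cs.take b') : b' ≤ findB cs b := by
  induction b with
  | zero => omega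
  | succ b ih =>
    unfold findB
    split_ifs with hc
    · omega
    · rcases Nat.lt_or_ge b' (b + 1) with hlt | hge
      · exact ih (by omega)
      · exfalso; have : b' = b + 1 := by omega
        subst this; exact hc h3

lemma altLoop_eq (cs : List Char) (n : Int) (b : Nat) :
    altLoop cs n b = cs ++ PySem.List.pyRepeat (cs.drop (findB cs b)) (n - 1) := by
  induction b with
  | zero => simp [altLoop, findB]
  | succ b ih =>
    unfold altLoop findB
    simp only [PySem.List.slice_from_natCast, PySem.List.slice_to_natCast]
    split_ifs with h
    · rfl
    · exact ih

-- only i = len - e can satisfy A's concatenation test, and then it states a border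
lemma cond_iff (cs : List Char) (e i : Nat) (he1 : 1 ≤ e) (he2 : e ≤ cs.length - 1)
    (hi1 : 1 ≤ i) (hi2 : i ≤ cs.length - 1) :
    (cs.drop e ++ cs.drop i = cs) ↔
      (i = cs.length - e ∧ cs.drop e = cs.take (cs.length - e)) := by
  have hL : 2 ≤ cs.length := by omega
  constructor
  · intro h
    have hlen := congrArg List.length h
    simp only [List.length_append, List.length_drop] at hlen
    have hie : i = cs.length - e := by omega
    subst hie
    refine ⟨rfl, ?_⟩
    have hsplit : cs.take (cs.length - e) ++ cs.drop (cs.length - e) = cs :=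
      List.take_append_drop _ _
    have := h.trans hsplit.symm
    exact List.append_cancel_right this
  · rintro ⟨hie, hb⟩
    subst hie
    rw [hb]
    exact List.take_append_drop _ _

-- a fold that overwrites on a condition only one list element can satisfy
lemma foldl_unique (cs : List Char) (e : Nat) (l : List Nat) (toAdd : List Char)
    (h : ∀ i ∈ l, (cs.drop e ++ cs.drop i = cs) ↔
        (i = cs.length - e ∧ cs.drop e = cs.take (cs.length - e))) :
    l.foldl (fun acc i => if cs.drop e ++ cs.drop i = cs then cs.drop i else acc) toAdd
      = if (cs.length - e) ∈ l ∧ cs.drop e = cs.take (cs.length - e)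
        then cs.drop (cs.length - e) else toAdd := by
  induction l generalizing toAdd with
  | nil => simp
  | cons a l ih =>
    have ha := h a (List.mem_cons_self ..)
    have h' : ∀ i ∈ l, (cs.drop e ++ cs.drop i = cs) ↔
        (i = cs.length - e ∧ cs.drop e = cs.take (cs.length - e)) :=
      fun i hi => h i (List.mem_cons_of_mem _ hi)
    simp only [List.foldl_cons]
    by_cases hP : cs.drop e = cs.take (cs.length - e)
    · by_cases hae : a = cs.length - e
      · subst hae
        rw [if_pos (ha.mpr ⟨rfl, hP⟩), ih _ h',
          if_pos (show (cs.length - e) ∈ (cs.length - e) :: l ∧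
              cs.drop e = cs.take (cs.length - e) from ⟨List.mem_cons_self .., hP⟩)]
        split_ifs <;> rfl
      · have hKa : ¬(cs.length - e = a) := fun hx => hae hx.symm
        rw [if_neg (fun hc => hae (ha.mp hc).1), ih _ h']
        have hmemiff : (cs.length - e) ∈ l ↔ (cs.length - e) ∈ a :: l := by
          simp [List.mem_cons, hKa]
        rw [if_congr (and_congr_left' hmemiff) rfl rfl]
    · rw [if_neg (fun hc => hP (ha.mp hc).2), ih _ h']
      simp [hP]

lemma inner_eq (cs : List Char) (e : Nat) (toAdd : List Char)
    (he1 : 1 ≤ e) (he2 : e ≤ cs.length - 1) :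
    repeteInner cs e toAdd
      = if cs.drop e = cs.take (cs.length - e) then cs.drop (cs.length - e) else toAdd := by
  have hL : 2 ≤ cs.length := by omega
  unfold repeteInner
  have hfun : (fun (acc : List Char) (i : Nat) =>
      if PySem.List.slice cs (some (e : Int)) none ++ PySem.List.slice cs (some (i : Int)) none = cs
      then PySem.List.slice cs (some (i : Int)) none
      else acc)
      = (fun (acc : List Char) (i : Nat) =>
          if cs.drop e ++ cs.drop i = cs then cs.drop i else acc) := by
    funext acc i
    simp [PySem.List.slice_from_natCast]
  rw [hfun]
  rw [foldl_unique cs e _ toAdd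
      (fun i hi => by
        have := List.mem_range'_1.mp hi
        exact cond_iff cs e i he1 he2 (by omega) (by omega))]
  have hmem : (cs.length - e) ∈ List.range' 1 (cs.length - 1) :=
    List.mem_range'_1.mpr (by omega)
  simp [hmem]

lemma scan_eq (cs : List Char) (e : Nat) (he : e ≤ cs.length - 1) (toAdd : List Char) :
    repeteScan cs e toAdd
      = if 1 ≤ findB cs (cs.length - 1) ∧ cs.length - e ≤ findB cs (cs.length - 1)
        then cs.drop (findB cs (cs.length - 1)) else toAdd := by
  induction e generalizing toAdd with
  | zero =>
    have hB := findB_le cs (cs.length - 1)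
    rw [if_neg (by omega)]
    rfl
  | succ e ih =>
    have hB := findB_le cs (cs.length - 1)
    unfold repeteScan
    rw [inner_eq cs (e + 1) toAdd (by omega) he, ih (by omega)]
    by_cases hP : cs.drop (e + 1) = cs.take (cs.length - (e + 1))
    · have hmax : cs.length - (e + 1) ≤ findB cs (cs.length - 1) := by
        apply findB_max cs _ _ (by omega) (by omega)
        have : cs.length - (cs.length - (e + 1)) = e + 1 := by omega
        rw [this]; exact hP
      have h1B : 1 ≤ findB cs (cs.length - 1) := by omega
      rw [if_pos hP,
        if_pos (show 1 ≤ findB cs (cs.length - 1) ∧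
            cs.length - (e + 1) ≤ findB cs (cs.length - 1) from ⟨h1B, hmax⟩)]
      split_ifs with h1
      · rfl
      · have heq : findB cs (cs.length - 1) = cs.length - (e + 1) := by omega
        rw [heq]
    · rw [if_neg hP]
      apply if_congr _ rfl rfl
      constructor
      · intro ⟨ha, hb⟩; exact ⟨ha, by omega⟩
      · rintro ⟨ha, hb⟩
        rcases Nat.lt_or_ge (findB cs (cs.length - 1)) (cs.length - e) with hlt | hge
        · exfalso
          have heq : findB cs (cs.length - 1) = cs.length - (e + 1) := by omega
          have := findB_border cs (cs.length - 1) ha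
          rw [heq] at this
          have h2 : cs.length - (cs.length - (e + 1)) = e + 1 := by omega
          rw [h2] at this
          exact hP this
        · exact ⟨ha, hge⟩

lemma app_eq (toAdd : List Char) (m : Nat) :
    ∀ (j n : Int), n - j = (m : Int) → ∀ result : List Char,
      repeteApp toAdd result j n = result ++ (List.replicate m toAdd).flatten := by
  induction m with
  | zero =>
    intro j n hjn result
    unfold repeteApp
    rw [if_pos (by omega)]
    simp
  | succ m ih =>
    intro j n hjn result
    unfold repeteApp
    rw [if_neg (by omega), if_pos (by omega), ih (j + 1) n (by omega)]
    simp [List.replicate_succ]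

-- ===== VERDICT (by name: the statement is the Claim_ definition above) =====
theorem repete_spec : Claim_equal_repete := by
  intro palavra n _ hpre
  obtain ⟨hlen, hn⟩ := hpre
  have hL : 1 ≤ palavra.toList.length := by
    simpa using hlen
  show String.ofList (repeteApp (repeteScan palavra.toList (palavra.toList.length - 1)
        palavra.toList) palavra.toList 1 n)
      = String.ofList (altLoop palavra.toList n (palavra.toList.length - 1))
  set cs := palavra.toList with hcs
  set B := findB cs (cs.length - 1) with hB
  have htoAdd : repeteScan cs (cs.length - 1) cs = cs.drop B := by
    rw [scan_eq cs (cs.length - 1) (le_refl _) cs]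
    split_ifs with h
    · rfl
    · have hBle := findB_le cs (cs.length - 1)
      have hB0 : B = 0 := by
        rcases Nat.eq_zero_or_pos B with h0 | h1
        · exact h0
        · exfalso; exact h ⟨h1, by omega⟩
      rw [hB0, List.drop_zero]
  rw [htoAdd, altLoop_eq cs n (cs.length - 1), ← hB]
  congr 1
  rw [app_eq (cs.drop B) (n - 1).toNat 1 n (by omega) cs]
  rfl
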